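-- pv_equiv track=rewrite | github.com/mustafakutay/3AP-in-Subsets-of-Z_N | 3AP_counter_S2^k.py | brute_force_3AP_count
-- ===== SOURCE A (Python) =====
-- def brute_force_3AP_count(S, mod):
--     """
--  This counts the number of 3-term arithmetic progressions among ordered triples (x,y,z) in a given set S,
--     where each triple is counted individually. The element x,y,z must be distinct and satisfy
--     the condition of forming an arithmetic progression.
--     """
--     count = 0
--     for x in S:
--         for y in S:
--             d = (y - x) % mod
--             if d == 0:
--                 # d=0 ise trivial ilerleme, atla
--                 continue
--             for z in S:
--                 if (z - y) % mod == d: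
--                     # Eğer (z - y) mod d ise bu bir 3-AP
--                     count += 1
--     return count
-- ===== SOURCE B (Python) =====
-- def brute_force_3AP_count(S, mod):
--     cnt = {}
--     for v in S:
--         r = v % mod
--         cnt[r] = cnt.get(r, 0) + 1
--     total = 0
--     for a, ca in cnt.items():
--         for b, cb in cnt.items():
--             if a != b:
--                 total += ca * cb * cnt.get((2 * b - a) % mod, 0)
--     return total
-- ===== Notes on version B (the rewrite author's own statement) =====
-- stated objective: faster
-- what changed: Counts by residue classes instead of by elements: one pass builds a residue counter, then the answer is assembled from products of multiplicities over pairs of DISTINCT residues (cnt[a]*cnt[b]*cnt[(2b-a)%mod]) with no loop over S elements at all, turning O(n^3) into O(n + r^2) with r = number of distinct residues.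
import Mathlib
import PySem

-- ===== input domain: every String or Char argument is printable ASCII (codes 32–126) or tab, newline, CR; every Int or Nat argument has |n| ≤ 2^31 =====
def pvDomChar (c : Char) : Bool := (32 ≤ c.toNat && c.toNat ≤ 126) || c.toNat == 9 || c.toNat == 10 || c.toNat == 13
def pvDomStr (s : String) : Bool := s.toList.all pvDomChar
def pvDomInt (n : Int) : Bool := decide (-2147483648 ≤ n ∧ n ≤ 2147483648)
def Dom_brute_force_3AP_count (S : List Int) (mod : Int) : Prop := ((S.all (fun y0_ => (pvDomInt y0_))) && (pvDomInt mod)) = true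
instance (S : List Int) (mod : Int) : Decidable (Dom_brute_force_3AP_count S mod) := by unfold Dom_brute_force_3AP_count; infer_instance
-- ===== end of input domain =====

-- B counts by residue classes: one pass builds a residue counter, then the answer is assembled from multiplicity products over pairs of DISTINCT residues (no loop over S elements), O(n^3) -> O(n + r^2).


-- ===== PORT A =====
def brute_force_3AP_count (S : List Int) (mod : Int) : Int :=
  S.foldl (fun count x =>
    S.foldl (fun count y =>
      let d := PySem.Int.mod (y - x) mod
      if d = 0 then count
      else S.foldl (fun count z =>
        if PySem.Int.mod (z - y) mod = d then count + 1 else count) count) count) 0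

-- ===== PORT B =====
def brute_force_3AP_count_alt (S : List Int) (mod : Int) : Int :=
  let cnt := S.foldl (fun d v => d.modify (PySem.Int.mod v mod) 0 (· + 1))
    (PySem.Dict.empty : PySem.Dict Int Int)
  cnt.items.foldl (fun total p =>
    cnt.items.foldl (fun total q =>
      if p.1 ≠ q.1 then
        total + p.2 * q.2 * cnt.getD (PySem.Int.mod (2 * q.1 - p.1) mod) 0
      else total) total) 0

-- ===== PRECONDITION & SPEC =====
-- Pre_ excludes exactly the inputs where Python A raises ZeroDivisionError: mod = 0 with S nonempty.
def Pre_brute_force_3AP_count (S : List Int) (mod : Int) : Prop := mod ≠ 0 ∨ S = []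
instance (S : List Int) (mod : Int) : Decidable (Pre_brute_force_3AP_count S mod) := by
  unfold Pre_brute_force_3AP_count; infer_instance
def pvWitness_brute_force_3AP_count : List Int × Int := ([0, 1, 2, 5], 7)

def Spec_brute_force_3AP_count (S : List Int) (mod : Int) (out : Int) : Prop := out = brute_force_3AP_count_alt S mod
instance (S : List Int) (mod : Int) (out : Int) : Decidable (Spec_brute_force_3AP_count S mod out) := by unfold Spec_brute_force_3AP_count; infer_instance

-- ===== CLAIM (what is proved, stated in full; the proofs are below) =====
def Claim_equal_brute_force_3AP_count : Prop := ∀ (S : List Int) (mod : Int), Dom_brute_force_3AP_count S mod → Pre_brute_force_3AP_count S mod → Spec_brute_force_3AP_count S mod (brute_force_3AP_count S mod)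

-- ===== LEMMAS AND PROOFS =====

-- Python '%' with a fixed nonzero modulus identifies exactly the congruence classes.
lemma pymod_eq_pymod_iff (m a b : Int) (hm : m ≠ 0) :
    PySem.Int.mod a m = PySem.Int.mod b m ↔ m ∣ (a - b) := by
  constructor
  · intro h
    have ha := PySem.Int.floordiv_mul_add_mod a m
    have hb := PySem.Int.floordiv_mul_add_mod b m
    exact ⟨PySem.Int.floordiv a m - PySem.Int.floordiv b m, by linarith [ha, hb, h]⟩
  · rintro ⟨k, hk⟩
    have ha := PySem.Int.floordiv_mul_add_mod a m
    have hb := PySem.Int.floordiv_mul_add_mod b m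
    set fa := PySem.Int.floordiv a m
    set fb := PySem.Int.floordiv b m
    set t := k - fa + fb with ht
    have hd : PySem.Int.mod a m - PySem.Int.mod b m = t * m := by
      have : a - b = k * m := by linarith [hk]
      nlinarith [ha, hb, this]
    have hz : t * m = 0 := by
      rcases lt_or_gt_of_ne hm with hneg | hpos
      · have h1 := PySem.Int.mod_neg_bounds a hneg
        have h2 := PySem.Int.mod_neg_bounds b hneg
        rcases lt_trichotomy t 0 with h | h | h
        · have : t * m ≥ -m * t := by nlinarith
          nlinarith [h1.1, h1.2, h2.1, h2.2]
        · simp [h]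
        · nlinarith [h1.1, h1.2, h2.1, h2.2]
      · have h1a := PySem.Int.mod_nonneg a hpos
        have h1b := PySem.Int.mod_lt a hpos
        have h2a := PySem.Int.mod_nonneg b hpos
        have h2b := PySem.Int.mod_lt b hpos
        rcases lt_trichotomy t 0 with h | h | h
        · nlinarith
        · simp [h]
        · nlinarith
    linarith [hd, hz]

-- Every integer is congruent to its Python residue.
lemma dvd_sub_pymod (m v : Int) : m ∣ (v - PySem.Int.mod v m) := by
  have h := PySem.Int.floordiv_mul_add_mod v m
  exact ⟨PySem.Int.floordiv v m, by linarith [h]⟩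

-- '(y - x) % m == 0' is exactly 'x and y share a residue'.
lemma pymod_sub_eq_zero_iff (m x y : Int) (hm : m ≠ 0) :
    PySem.Int.mod (y - x) m = 0 ↔ PySem.Int.mod x m = PySem.Int.mod y m := by
  have h0 : PySem.Int.mod 0 m = 0 := by simp [PySem.Int.mod]
  rw [show (PySem.Int.mod (y - x) m = 0) ↔ (PySem.Int.mod (y - x) m = PySem.Int.mod 0 m) by
      rw [h0], pymod_eq_pymod_iff m (y - x) 0 hm, pymod_eq_pymod_iff m x y hm]
  constructor
  · rintro ⟨k, hk⟩; exact ⟨-k, by linarith⟩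
  · rintro ⟨k, hk⟩; exact ⟨-k, by linarith⟩

-- A's inner z-scan counts the residue class of 2y - x among S's residues.
lemma inner_count_eq (S : List Int) (m x y : Int) (hm : m ≠ 0) :
    (S.countP (fun z => decide (PySem.Int.mod (z - y) m = PySem.Int.mod (y - x) m)) : Int)
    = ((S.map (fun z => PySem.Int.mod z m)).count (PySem.Int.mod (2 * y - x) m) : Int) := by
  rw [List.count_eq_countP, List.countP_map]
  congr 1
  apply List.countP_congr
  intro z _
  simp only [Function.comp, beq_iff_eq]
  rw [decide_eq_true_iff, pymod_eq_pymod_iff m (z - y) (y - x) hm,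
    pymod_eq_pymod_iff m z (2 * y - x) hm,
    show z - y - (y - x) = z - (2 * y - x) by ring]

-- Sum of a pointwise sum splits.
lemma sum_map_add' (l : List Int) (f g : Int → Int) :
    (l.map (fun a => f a + g a)).sum = (l.map f).sum + (l.map g).sum := by
  induction l with
  | nil => simp
  | cons x l ih => simp [ih]; ring

-- A constant factor pulls out of a list sum.
lemma sum_map_mul_left' (l : List Int) (c : Int) (f : Int → Int) :
    (l.map (fun a => c * f a)).sum = c * (l.map f).sum := by
  induction l with
  | nil => simp
  | cons x l ih => simp [ih]; ring

-- Summing an indicator over a Nodup list picks the unique hit.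
lemma sum_map_ite_single (g : Int → Int) (K : List Int) (r : Int)
    (hnd : K.Nodup) (hr : r ∈ K) :
    (K.map (fun a => if a = r then g a else 0)).sum = g r := by
  induction K with
  | nil => cases hr
  | cons k K ih =>
    rcases List.nodup_cons.mp hnd with ⟨hk, hnd'⟩
    simp only [List.map_cons, List.sum_cons]
    by_cases hkr : k = r
    · subst hkr
      rw [if_pos rfl]
      have hz : (K.map (fun a => if a = k then g a else 0)).sum = 0 := by
        apply List.sum_eq_zero
        intro w hw
        rcases List.mem_map.mp hw with ⟨a, ha, rfl⟩
        simp [show a ≠ k from fun h' => hk (h' ▸ ha)]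
      rw [hz, add_zero]
    · have hrK : r ∈ K := by
        rcases List.mem_cons.mp hr with h | h
        · exact absurd h.symm hkr
        · exact h
      rw [if_neg hkr, ih hnd' hrK, zero_add]

-- Grouping a sum over a list by its distinct values with multiplicities.
lemma group_sum (g : Int → Int) (L K : List Int)
    (hnd : K.Nodup) (hsub : ∀ a ∈ L, a ∈ K) :
    (L.map g).sum = (K.map (fun a => (L.count a : Int) * g a)).sum := by
  induction L with
  | nil => simp
  | cons x L ih =>
    have hx : x ∈ K := hsub x (List.mem_cons_self ..)
    have hsub' : ∀ a ∈ L, a ∈ K := fun a ha => hsub a (List.mem_cons_of_mem _ ha)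
    simp only [List.map_cons, List.sum_cons]
    rw [ih hsub']
    have hmap : (K.map (fun a => ((x :: L).count a : Int) * g a))
        = K.map (fun a => (if a = x then g a else 0) + (L.count a : Int) * g a) := by
      apply List.map_congr_left
      intro a _
      rw [List.count_cons]
      by_cases h : a = x
      · subst h
        simp only [BEq.rfl, if_true]
        push_cast; ring
      · have hxa : (x == a) = false := beq_eq_false_iff_ne.mpr (fun e => h e.symm)
        rw [hxa, if_neg h]
        simp
    rw [hmap, sum_map_add', sum_map_ite_single g K x hnd hx]

-- ===== VERDICT (by name: the statement is the Claim_ definition above) =====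
theorem brute_force_3AP_count_spec : Claim_equal_brute_force_3AP_count := by
  intro S m _ hpre
  unfold Spec_brute_force_3AP_count
  rcases hpre with hm | hS
  swap
  · subst hS; rfl
  set R : List Int := S.map (fun v => PySem.Int.mod v m) with hRdef
  set K : List Int := PySem.Set.ofList R with hKdef
  -- Step 1: A as a nested sum over S of a residue-pair contribution
  have hA : brute_force_3AP_count S m
      = (S.map (fun x => (S.map (fun y =>
          if PySem.Int.mod x m ≠ PySem.Int.mod y m then
            (R.count (PySem.Int.mod (2 * (PySem.Int.mod y m) - PySem.Int.mod x m) m) : Int)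
          else 0)).sum)).sum := by
    unfold brute_force_3AP_count
    rw [PySem.List.foldl_congr_mem S _
      (fun count x => count + (S.map (fun y =>
          if PySem.Int.mod x m ≠ PySem.Int.mod y m then
            (R.count (PySem.Int.mod (2 * (PySem.Int.mod y m) - PySem.Int.mod x m) m) : Int)
          else 0)).sum) 0 ?_]
    · rw [PySem.List.foldl_add, zero_add]
    · intro acc x _
      beta_reduce
      rw [PySem.List.foldl_congr_mem S _
        (fun count y => count +
          (if PySem.Int.mod x m ≠ PySem.Int.mod y m then
            (R.count (PySem.Int.mod (2 * (PySem.Int.mod y m) - PySem.Int.mod x m) m) : Int)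
          else 0)) acc ?_]
      · rw [PySem.List.foldl_add]
      · intro acc' y _
        beta_reduce
        by_cases hd : PySem.Int.mod (y - x) m = 0
        · have hxy := (pymod_sub_eq_zero_iff m x y hm).mp hd
          simp [hd, hxy]
        · have hxy : PySem.Int.mod x m ≠ PySem.Int.mod y m :=
            fun h => hd ((pymod_sub_eq_zero_iff m x y hm).mpr h)
          rw [if_neg hd, PySem.List.foldl_ite_add_one, inner_count_eq S m x y hm,
            if_pos hxy]
          have hcnt : PySem.Int.mod (2 * y - x) m
              = PySem.Int.mod (2 * (PySem.Int.mod y m) - PySem.Int.mod x m) m := by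
            rw [pymod_eq_pymod_iff m _ _ hm,
              show (2 * y - x) - (2 * (PySem.Int.mod y m) - PySem.Int.mod x m)
                = 2 * (y - PySem.Int.mod y m) - (x - PySem.Int.mod x m) by ring]
            exact dvd_sub (Dvd.dvd.mul_left (dvd_sub_pymod m y) 2) (dvd_sub_pymod m x)
          rw [hcnt, hRdef]
  -- Step 2: B as the same sum over the counter's items
  have hcntD : S.foldl (fun d v => d.modify (PySem.Int.mod v m) 0 (· + 1))
      (PySem.Dict.empty : PySem.Dict Int Int) = PySem.Dict.counter R := by
    rw [PySem.Dict.counter_eq_foldl, hRdef, List.foldl_map]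
  have hB : brute_force_3AP_count_alt S m
      = (K.map (fun a => (K.map (fun b =>
          if a ≠ b then
            (R.count a : Int) * (R.count b : Int)
              * (R.count (PySem.Int.mod (2 * b - a) m) : Int)
          else 0)).sum)).sum := by
    unfold brute_force_3AP_count_alt
    simp only [hcntD, PySem.Dict.items_counter, PySem.Dict.getD_counter]
    rw [PySem.List.foldl_congr_mem _ _
      (fun total p => total + ((K.map (fun k => (k, (R.count k : Int)))).map (fun q =>
        if p.1 ≠ q.1 then p.2 * q.2 * (R.count (PySem.Int.mod (2 * q.1 - p.1) m) : Int)
        else 0)).sum) 0 ?_]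
    · rw [PySem.List.foldl_add, zero_add, List.map_map]
      apply congrArg
      apply List.map_congr_left
      intro a _
      simp only [Function.comp]
      rw [List.map_map]
      apply congrArg
      apply List.map_congr_left
      intro b _
      simp only [Function.comp]
    · intro acc p _
      beta_reduce
      rw [PySem.List.foldl_congr_mem _ _
        (fun total q => total + (if p.1 ≠ q.1 then
          p.2 * q.2 * (R.count (PySem.Int.mod (2 * q.1 - p.1) m) : Int) else 0)) acc ?_]
      · rw [PySem.List.foldl_add]
      · intro acc' q _
        beta_reduce
        by_cases h : p.1 ≠ q.1
        · rw [if_pos h, if_pos h]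
        · rw [if_neg h, if_neg h, add_zero]
  -- Step 3: group A's element sums into residue-class sums
  rw [hA, hB]
  have hnd : K.Nodup := PySem.Set.nodup_ofList R
  have hsub : ∀ a ∈ R, a ∈ K := fun a ha => (PySem.Set.mem_ofList R a).mpr ha
  have hmapR : ∀ (g : Int → Int), S.map (fun v => g (PySem.Int.mod v m)) = R.map g := by
    intro g; rw [hRdef, List.map_map]; rfl
  calc (S.map (fun x => (S.map (fun y =>
          if PySem.Int.mod x m ≠ PySem.Int.mod y m then
            (R.count (PySem.Int.mod (2 * (PySem.Int.mod y m) - PySem.Int.mod x m) m) : Int)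
          else 0)).sum)).sum
      = (R.map (fun a => (R.map (fun b =>
          if a ≠ b then (R.count (PySem.Int.mod (2 * b - a) m) : Int) else 0)).sum)).sum := by
        rw [← hmapR (fun a => (R.map (fun b =>
          if a ≠ b then (R.count (PySem.Int.mod (2 * b - a) m) : Int) else 0)).sum)]
        apply congrArg
        apply List.map_congr_left
        intro x _
        beta_reduce
        rw [← hmapR (fun b =>
          if PySem.Int.mod x m ≠ b then
            (R.count (PySem.Int.mod (2 * b - PySem.Int.mod x m) m) : Int) else 0)]
    _ = (K.map (fun a => (R.count a : Int) * (R.map (fun b =>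
          if a ≠ b then (R.count (PySem.Int.mod (2 * b - a) m) : Int) else 0)).sum)).sum :=
        group_sum _ R K hnd hsub
    _ = (K.map (fun a => (K.map (fun b =>
          if a ≠ b then
            (R.count a : Int) * (R.count b : Int)
              * (R.count (PySem.Int.mod (2 * b - a) m) : Int)
          else 0)).sum)).sum := by
        apply congrArg
        apply List.map_congr_left
        intro a _
        beta_reduce
        rw [group_sum _ R K hnd hsub, ← sum_map_mul_left']
        apply congrArg
        apply List.map_congr_left
        intro b _
        beta_reduce
        by_cases hab : a ≠ b
        · rw [if_pos hab, if_pos hab]; ring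
        · rw [if_neg hab, if_neg hab, mul_zero, mul_zero]
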